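-- pv_equiv track=rewrite | github.com/wardspan/EE120 | timing_diagram_2.py | simulate_shift_register
-- ===== SOURCE A (Python) =====
-- def simulate_shift_register(clock, periods, steps_per_period, register_type, use_complement):
--     # Initialize Q0, Q1, Q2, Q3 as low (0)
--     Q0 = [0] * len(clock)
--     Q1 = [0] * len(clock)
--     Q2 = [0] * len(clock)
--     Q3 = [0] * len(clock)
--
--     # Initial data input to Q0
--     data_input = 1  # This is the data we are shifting through the register
--
--     for i in range(1, len(clock)):
--         if clock[i-1] == 0 and clock[i] == 1:  # Rising edge detected
--             # Shift the values from Q0 to Q3 on the rising edge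
--             for j in range(i, len(clock)):  # Update from the current clock step to the end
--                 Q3[j] = Q2[i-1]  # Q3 takes the value of Q2
--                 Q2[j] = Q1[i-1]  # Q2 takes the value of Q1
--                 Q1[j] = Q0[i-1]  # Q1 takes the value of Q0
--                 Q0[j] = data_input  # Q0 takes the new data input (assumed to be 1 here)
--
--     return Q0, Q1, Q2, Q3
-- ===== SOURCE B (Python) =====
-- def simulate_shift_register(clock, periods, steps_per_period, register_type, use_complement):
--     # Single forward pass: carry the current (q0,q1,q2,q3) state, shift it on
--     # each rising edge, and record it at every position.
--     Q0 = []; Q1 = []; Q2 = []; Q3 = []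
--     q0 = q1 = q2 = q3 = 0
--     prev = None
--     for c in clock:
--         if prev == 0 and c == 1:
--             q0, q1, q2, q3 = 1, q0, q1, q2
--         Q0.append(q0); Q1.append(q1); Q2.append(q2); Q3.append(q3)
--         prev = c
--     return Q0, Q1, Q2, Q3
-- ===== Notes on version B (the rewrite author's own statement) =====
-- stated objective: alternative
-- what changed: A rewrites the whole tail of all four Q lists on every rising edge (nested loops over the clock); B makes one forward pass carrying the 4-bit register state, shifting it on each rising edge and appending it once per position.
import Mathlib
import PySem

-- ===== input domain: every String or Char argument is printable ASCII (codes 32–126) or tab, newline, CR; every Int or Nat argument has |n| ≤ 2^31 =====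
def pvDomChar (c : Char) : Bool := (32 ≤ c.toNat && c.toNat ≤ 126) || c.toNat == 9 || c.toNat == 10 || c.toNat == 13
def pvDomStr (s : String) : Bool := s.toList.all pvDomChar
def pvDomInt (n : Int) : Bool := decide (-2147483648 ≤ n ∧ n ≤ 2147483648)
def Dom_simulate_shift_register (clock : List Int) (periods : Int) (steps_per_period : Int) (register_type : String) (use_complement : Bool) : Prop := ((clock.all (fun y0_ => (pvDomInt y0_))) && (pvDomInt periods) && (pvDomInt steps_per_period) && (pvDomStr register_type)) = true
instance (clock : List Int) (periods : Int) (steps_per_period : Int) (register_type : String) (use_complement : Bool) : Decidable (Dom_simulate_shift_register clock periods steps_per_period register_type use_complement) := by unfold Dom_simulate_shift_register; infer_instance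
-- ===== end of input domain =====

-- B replaces A's rewrite-the-tail-of-all-four-Q-lists-on-every-rising-edge nested
-- loops by a single forward pass carrying the register state; return values proved equal.

-- ===== PORT A =====
-- inner 'for j in range(i, len(clock))' body; all indices are in range in A
-- (1 ≤ i ≤ j < len), so pyGet?.getD 0 is exact there (IndexError unreachable)
def pvInnerA (i : Int) (st : List Int × List Int × List Int × List Int) (j : Int) :
    List Int × List Int × List Int × List Int :=
  -- Python assignment order: Q3, Q2, Q1, Q0; each reads index i-1 (< j, so
  -- unaffected by this iteration's writes at j)
  let q3 := st.2.2.2.set j.toNat ((PySem.List.pyGet? st.2.2.1 (i-1)).getD 0)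
  let q2 := st.2.2.1.set j.toNat ((PySem.List.pyGet? st.2.1 (i-1)).getD 0)
  let q1 := st.2.1.set j.toNat ((PySem.List.pyGet? st.1 (i-1)).getD 0)
  let q0 := st.1.set j.toNat (1 : Int)   -- data_input = 1
  (q0, q1, q2, q3)

-- outer 'for i in range(1, len(clock))' body
def pvOuterA (clock : List Int) (n : Int) (st : List Int × List Int × List Int × List Int)
    (i : Int) : List Int × List Int × List Int × List Int :=
  if (PySem.List.pyGet? clock (i-1)).getD 0 = 0 ∧ (PySem.List.pyGet? clock i).getD 0 = 1 then
    (PySem.List.pyRange i n 1).foldl (pvInnerA i) st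
  else st

def simulate_shift_register (clock : List Int) (periods : Int) (steps_per_period : Int)
    (register_type : String) (use_complement : Bool) :
    List Int × List Int × List Int × List Int :=
  let n : Int := PySem.List.len clock
  (PySem.List.pyRange 1 n 1).foldl (pvOuterA clock n)
    (List.replicate clock.length (0 : Int), List.replicate clock.length (0 : Int),
     List.replicate clock.length (0 : Int), List.replicate clock.length (0 : Int))

-- ===== PORT B =====
-- loop body of Source B: acc = ((Q0,Q1,Q2,Q3), (q0,q1,q2,q3), prev)
def pvAltStep (acc : (List Int × List Int × List Int × List Int) × (Int × Int × Int × Int) × Option Int)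
    (c : Int) : (List Int × List Int × List Int × List Int) × (Int × Int × Int × Int) × Option Int :=
  let s := if acc.2.2 = some 0 ∧ c = 1 then (1, acc.2.1.1, acc.2.1.2.1, acc.2.1.2.2.1) else acc.2.1
  ((acc.1.1 ++ [s.1], acc.1.2.1 ++ [s.2.1], acc.1.2.2.1 ++ [s.2.2.1], acc.1.2.2.2 ++ [s.2.2.2]),
   s, some c)

def simulate_shift_register_alt (clock : List Int) (periods : Int) (steps_per_period : Int)
    (register_type : String) (use_complement : Bool) :
    List Int × List Int × List Int × List Int :=
  (clock.foldl pvAltStep (([], [], [], []), (0, 0, 0, 0), none)).1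

-- ===== PRECONDITION & SPEC =====
def Spec_simulate_shift_register (clock : List Int) (periods : Int) (steps_per_period : Int) (register_type : String) (use_complement : Bool) (out : List Int × List Int × List Int × List Int) : Prop := out = simulate_shift_register_alt clock periods steps_per_period register_type use_complement
instance (clock : List Int) (periods : Int) (steps_per_period : Int) (register_type : String) (use_complement : Bool) (out : List Int × List Int × List Int × List Int) : Decidable (Spec_simulate_shift_register clock periods steps_per_period register_type use_complement out) := by unfold Spec_simulate_shift_register; infer_instance

-- ===== CLAIM (what is proved, stated in full; the proofs are below) =====
def Claim_equal_simulate_shift_register : Prop := ∀ (clock : List Int) (periods : Int) (steps_per_period : Int) (register_type : String) (use_complement : Bool), Dom_simulate_shift_register clock periods steps_per_period register_type use_complement → Spec_simulate_shift_register clock periods steps_per_period register_type use_complement (simulate_shift_register clock periods steps_per_period register_type use_complement)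

-- ===== LEMMAS AND PROOFS =====

-- the state trace: pvT cs prev s lists the register state at each remaining
-- clock position, given the previous clock value and the current state
def pvT : List Int → Int → (Int × Int × Int × Int) → List (Int × Int × Int × Int)
  | [], _, _ => []
  | c :: cs, prev, s =>
    let s' := if prev = 0 ∧ c = 1 then (1, s.1, s.2.1, s.2.2.1) else s
    s' :: pvT cs c s'

lemma pvAlt_foldl (cs : List Int) : ∀ (prev : Int) (s : Int × Int × Int × Int)
    (a0 a1 a2 a3 : List Int),
    (cs.foldl pvAltStep ((a0, a1, a2, a3), s, some prev)).1
      = (a0 ++ (pvT cs prev s).map (·.1), a1 ++ (pvT cs prev s).map (·.2.1),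
         a2 ++ (pvT cs prev s).map (·.2.2.1), a3 ++ (pvT cs prev s).map (·.2.2.2)) := by
  induction cs with
  | nil => intro prev s a0 a1 a2 a3; simp [pvT]
  | cons c cs ih =>
    intro prev s a0 a1 a2 a3
    simp only [List.foldl_cons, pvAltStep, Option.some.injEq]
    by_cases h : prev = 0 ∧ c = 1 <;> simp [pvT, h, ih, List.append_assoc]

lemma pv_take_set (l : List Int) : ∀ (j : Nat) (v : Int), j < l.length →
    (l.set j v).take (j+1) = l.take j ++ [v] := by
  induction l with
  | nil => intro j v h; simp at h
  | cons a l ih =>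
    intro j v h
    cases j with
    | zero => simp
    | succ j => simpa [List.set_cons_succ, List.take_succ_cons] using ih j v (by simpa using h)

lemma pv_get_set_ne (l : List Int) : ∀ (i j : Nat) (v : Int), i ≠ j →
    (l.set i v)[j]? = l[j]? := by
  induction l with
  | nil => intro i j v _; simp
  | cons a l ih =>
    intro i j v h
    cases i with
    | zero => cases j with
      | zero => exact absurd rfl h
      | succ j => simp
    | succ i => cases j with
      | zero => simp
      | succ j => simpa [List.set_cons_succ] using ih i j v (by omega)

lemma pv_get_append_len (p : List Int) : ∀ (l' : List Int) (x : Int),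
    (p ++ x :: l')[p.length]? = some x := by
  induction p with
  | nil => intro l' x; simp
  | cons a p ih => intro l' x; simpa using ih l' x

lemma pv_take_append_one (p : List Int) : ∀ (l' : List Int) (x : Int),
    (p ++ x :: l').take (p.length + 1) = p ++ [x] := by
  induction p with
  | nil => intro l' x; simp
  | cons a p ih => intro l' x; simpa [List.take_succ_cons] using ih l' x

lemma pvInner_foldl (i : Int) (hi : 0 ≤ i - 1) (b0 b1 b2 : Int) :
    ∀ (mm : Nat) (j : Nat) (q0 q1 q2 q3 : List Int),
    q0.length = j + mm → q1.length = j + mm → q2.length = j + mm → q3.length = j + mm →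
    (i - 1).toNat < j →
    q0[(i-1).toNat]? = some b0 → q1[(i-1).toNat]? = some b1 → q2[(i-1).toNat]? = some b2 →
    (PySem.List.pyRange (j : Int) ((j + mm : Nat) : Int) 1).foldl (pvInnerA i) (q0, q1, q2, q3)
      = (q0.take j ++ List.replicate mm (1 : Int), q1.take j ++ List.replicate mm b0,
         q2.take j ++ List.replicate mm b1, q3.take j ++ List.replicate mm b2) := by
  intro mm
  induction mm with
  | zero =>
    intro j q0 q1 q2 q3 h0 h1 h2 h3 hj g0 g1 g2
    rw [PySem.List.pyRange_one_eq_nil (by push_cast; omega)]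
    simp [List.take_of_length_le]
    omega
  | succ mm ih =>
    intro j q0 q1 q2 q3 h0 h1 h2 h3 hj g0 g1 g2
    rw [PySem.List.pyRange_one_cons (by push_cast; omega)]
    rw [List.foldl_cons]
    have hne : j ≠ (i-1).toNat := by omega
    have hred : pvInnerA i (q0, q1, q2, q3) (j : Int)
        = (q0.set j 1, q1.set j b0, q2.set j b1, q3.set j b2) := by
      simp only [pvInnerA, PySem.List.pyGet?_of_nonneg q0 hi, PySem.List.pyGet?_of_nonneg q1 hi,
        PySem.List.pyGet?_of_nonneg q2 hi, g0, g1, g2, Option.getD_some, Int.toNat_natCast]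
    rw [hred]
    have hcast1 : ((j : Int) + 1) = ((j + 1 : Nat) : Int) := by push_cast; ring
    have hcast2 : ((j + (mm + 1) : Nat) : Int) = (((j + 1) + mm : Nat) : Int) := by
      congr 1; omega
    rw [hcast1, hcast2]
    rw [ih (j+1) (q0.set j 1) (q1.set j b0) (q2.set j b1) (q3.set j b2)
      (by simp; omega) (by simp; omega) (by simp; omega) (by simp; omega) (by omega)
      (by rw [pv_get_set_ne _ _ _ _ hne]; exact g0)
      (by rw [pv_get_set_ne _ _ _ _ hne]; exact g1)
      (by rw [pv_get_set_ne _ _ _ _ hne]; exact g2)]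
    have hjl0 : j < q0.length := by omega
    have hjl1 : j < q1.length := by omega
    have hjl2 : j < q2.length := by omega
    have hjl3 : j < q3.length := by omega
    rw [pv_take_set _ _ _ hjl0, pv_take_set _ _ _ hjl1, pv_take_set _ _ _ hjl2,
      pv_take_set _ _ _ hjl3]
    simp [List.replicate_succ, List.append_assoc]

lemma pvOuter_foldl (clock : List Int) :
    ∀ (m : Nat) (k : Nat) (prev : Int) (s : Int × Int × Int × Int) (p0 p1 p2 p3 : List Int),
    1 ≤ k → k + m = clock.length →
    clock[k-1]? = some prev →
    p0.length = k - 1 → p1.length = k - 1 → p2.length = k - 1 → p3.length = k - 1 →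
    (PySem.List.pyRange (k : Int) ((clock.length : Nat) : Int) 1).foldl
        (pvOuterA clock ((clock.length : Nat) : Int))
        (p0 ++ List.replicate (m+1) s.1, p1 ++ List.replicate (m+1) s.2.1,
         p2 ++ List.replicate (m+1) s.2.2.1, p3 ++ List.replicate (m+1) s.2.2.2)
      = (p0 ++ s.1 :: (pvT (clock.drop k) prev s).map (·.1),
         p1 ++ s.2.1 :: (pvT (clock.drop k) prev s).map (·.2.1),
         p2 ++ s.2.2.1 :: (pvT (clock.drop k) prev s).map (·.2.2.1),
         p3 ++ s.2.2.2 :: (pvT (clock.drop k) prev s).map (·.2.2.2)) := by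
  intro m
  induction m with
  | zero =>
    intro k prev s p0 p1 p2 p3 hk hkm hprev h0 h1 h2 h3
    rw [PySem.List.pyRange_one_eq_nil (by push_cast; omega)]
    have hd : clock.drop k = [] := List.drop_eq_nil_of_le (by omega)
    simp [hd, pvT]
  | succ m ih =>
    intro k prev s p0 p1 p2 p3 hk hkm hprev h0 h1 h2 h3
    have hkn : k < clock.length := by omega
    rw [PySem.List.pyRange_one_cons (by push_cast; omega)]
    rw [List.foldl_cons]
    have hdk : clock.drop k = clock[k] :: clock.drop (k+1) := List.drop_eq_getElem_cons hkn
    have hg1 : (PySem.List.pyGet? clock ((k : Int) - 1)).getD 0 = prev := by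
      rw [show ((k : Int) - 1) = ((k - 1 : Nat) : Int) by omega]
      rw [PySem.List.pyGet?_natCast, hprev]; rfl
    have hg2 : (PySem.List.pyGet? clock (k : Int)).getD 0 = clock[k] := by
      rw [PySem.List.pyGet?_natCast, List.getElem?_eq_getElem hkn]; rfl
    have hcast1 : ((k : Int) + 1) = ((k + 1 : Nat) : Int) := by push_cast; ring
    simp only [pvOuterA, hg1, hg2]
    by_cases hcond : prev = 0 ∧ clock[k] = 1
    · rw [if_pos hcond]
      -- rewrite the inner fold
      have hrep0 : p0 ++ List.replicate (m+1+1) s.1 = p0 ++ s.1 :: List.replicate (m+1) s.1 := by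
        rw [List.replicate_succ]
      have hrep1 : p1 ++ List.replicate (m+1+1) s.2.1 = p1 ++ s.2.1 :: List.replicate (m+1) s.2.1 := by
        rw [List.replicate_succ]
      have hrep2 : p2 ++ List.replicate (m+1+1) s.2.2.1 = p2 ++ s.2.2.1 :: List.replicate (m+1) s.2.2.1 := by
        rw [List.replicate_succ]
      have hrep3 : p3 ++ List.replicate (m+1+1) s.2.2.2 = p3 ++ s.2.2.2 :: List.replicate (m+1) s.2.2.2 := by
        rw [List.replicate_succ]
      have hitoNat : ((k : Int) - 1).toNat = k - 1 := by omega
      have hlen : ∀ (p : List Int) (x : Int), p.length = k - 1 →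
          (p ++ x :: List.replicate (m+1) x).length = k + (m+1) := by
        intro p x hp; simp [hp]; omega
      have hget : ∀ (p : List Int) (x : Int), p.length = k - 1 →
          (p ++ x :: List.replicate (m+1) x)[k-1]? = some x := by
        intro p x hp; rw [← hp, pv_get_append_len]
      have hinner := pvInner_foldl (k : Int) (by omega) s.1 s.2.1 s.2.2.1 (m+1) k
        (p0 ++ s.1 :: List.replicate (m+1) s.1) (p1 ++ s.2.1 :: List.replicate (m+1) s.2.1)
        (p2 ++ s.2.2.1 :: List.replicate (m+1) s.2.2.1) (p3 ++ s.2.2.2 :: List.replicate (m+1) s.2.2.2)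
        (hlen p0 s.1 h0) (hlen p1 s.2.1 h1) (hlen p2 s.2.2.1 h2) (hlen p3 s.2.2.2 h3)
        (by omega)
        (by rw [hitoNat]; exact hget p0 s.1 h0)
        (by rw [hitoNat]; exact hget p1 s.2.1 h1)
        (by rw [hitoNat]; exact hget p2 s.2.2.1 h2)
      rw [show ((k + (m+1) : Nat) : Int) = ((clock.length : Nat) : Int) by rw [hkm]] at hinner
      rw [hrep0, hrep1, hrep2, hrep3, hinner]
      have htake : ∀ (p : List Int) (x : Int), p.length = k - 1 →
          (p ++ x :: List.replicate (m+1) x).take k = p ++ [x] := by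
        intro p x hp
        rw [show k = p.length + 1 by omega, pv_take_append_one]
      rw [htake p0 s.1 h0, htake p1 s.2.1 h1, htake p2 s.2.2.1 h2, htake p3 s.2.2.2 h3]
      rw [hcast1]
      rw [ih (k+1) clock[k] (1, s.1, s.2.1, s.2.2.1) (p0 ++ [s.1]) (p1 ++ [s.2.1])
        (p2 ++ [s.2.2.1]) (p3 ++ [s.2.2.2])
        (by omega) (by omega)
        (by simpa using List.getElem?_eq_getElem hkn)
        (by simp [h0]; omega) (by simp [h1]; omega) (by simp [h2]; omega) (by simp [h3]; omega)]
      rw [hdk]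
      simp [pvT, hcond, List.append_assoc]
    · rw [if_neg hcond]
      have hrep : ∀ (p : List Int) (x : Int),
          p ++ List.replicate (m+1+1) x = (p ++ [x]) ++ List.replicate (m+1) x := by
        intro p x; rw [List.replicate_succ]; simp
      rw [hrep p0, hrep p1, hrep p2, hrep p3, hcast1]
      rw [ih (k+1) clock[k] s (p0 ++ [s.1]) (p1 ++ [s.2.1]) (p2 ++ [s.2.2.1]) (p3 ++ [s.2.2.2])
        (by omega) (by omega)
        (by simpa using List.getElem?_eq_getElem hkn)
        (by simp [h0]; omega) (by simp [h1]; omega) (by simp [h2]; omega) (by simp [h3]; omega)]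
      rw [hdk]
      simp [pvT, hcond, List.append_assoc]

-- ===== VERDICT (by name: the statement is the Claim_ definition above) =====
theorem simulate_shift_register_spec : Claim_equal_simulate_shift_register := by
  intro clock periods steps_per_period register_type use_complement _
  unfold Spec_simulate_shift_register
  cases clock with
  | nil => rfl
  | cons c cs =>
    have hA := pvOuter_foldl (c :: cs) cs.length 1 c (0,0,0,0) [] [] [] []
      (le_refl 1) (by simp [Nat.add_comm]) (by simp) rfl rfl rfl rfl
    simp only [Nat.cast_one, List.nil_append, List.length_cons, List.drop_succ_cons,
      List.drop_zero] at hA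
    simp only [simulate_shift_register, simulate_shift_register_alt, PySem.List.len_eq,
      List.length_cons, List.foldl_cons]
    rw [hA]
    have hstep : pvAltStep (([], [], [], []), (0, 0, 0, 0), none) c
        = (([0], [0], [0], [0]), (0, 0, 0, 0), some c) := by
      simp [pvAltStep]
    rw [hstep, pvAlt_foldl]
    simp
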